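-- pv_equiv track=rewrite | github.com/Nama21yo/Natnael_CP | 08-Feb-2025/Same Differences 251094.py | solve
-- ===== SOURCE A (Python) =====
-- from collections import defaultdict
--
-- def solve(nums, n):
--     count_pair = defaultdict(int)
--     ans = 0
--     for i in range(n):
--         nums[i] = nums[i] - i
--         ans += count_pair[nums[i]]
--         count_pair[nums[i]] += 1
--
--     return ans
-- ===== SOURCE B (Python) =====
-- def solve(nums, n):
--     vals = []
--     for i in range(n):
--         nums[i] = nums[i] - i
--         vals.append(nums[i])
--     vals.sort()
--     ans = 0
--     run = 0
--     prev = None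
--     for x in vals:
--         if x == prev:
--             run += 1
--         else:
--             ans += run * (run - 1) // 2
--             run = 1
--         prev = x
--     return ans + run * (run - 1) // 2
-- ===== Notes on version B (the rewrite author's own statement) =====
-- stated objective: alternative
-- what changed: B removes the hash-count dictionary entirely: it collects the transformed values nums[i]-i into a list (keeping A's in-place mutation of nums), sorts it, and counts pairs by a linear scan over adjacent equal elements, adding k*(k-1)//2 per run of length k.
import Mathlib
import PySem

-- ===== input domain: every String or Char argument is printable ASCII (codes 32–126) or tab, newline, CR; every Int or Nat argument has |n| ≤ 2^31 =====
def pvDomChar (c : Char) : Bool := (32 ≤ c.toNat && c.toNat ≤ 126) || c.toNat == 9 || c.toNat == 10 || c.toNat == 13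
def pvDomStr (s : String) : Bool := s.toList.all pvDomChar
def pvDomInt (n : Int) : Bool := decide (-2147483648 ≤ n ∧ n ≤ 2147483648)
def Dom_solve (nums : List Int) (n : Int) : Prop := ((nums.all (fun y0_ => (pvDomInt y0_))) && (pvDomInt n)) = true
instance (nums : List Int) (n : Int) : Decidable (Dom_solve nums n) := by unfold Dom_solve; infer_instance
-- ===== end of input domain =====

-- B replaces A's dictionary of running prefix counts by sorting the transformed values
-- nums[i]-i and scanning adjacent equal elements, adding k*(k-1)//2 per run of length k
-- (same in-place mutation of nums; equality of the RETURN value is what is proved here).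


-- ===== PORT A =====
-- loop body of A: nums[i] = nums[i] - i; ans += count_pair[nums[i]]; count_pair[nums[i]] += 1
-- (defaultdict read-then-increment = getD then modify); state = (count_pair, ans, nums)
def pvStepA (st : PySem.Dict Int Int × Int × List Int) (i : Int) :
    PySem.Dict Int Int × Int × List Int :=
  let v := PySem.List.pyGetD st.2.2 i 0 - i
  (st.1.modify v 0 (· + 1), st.2.1 + st.1.getD v 0, PySem.List.pySetD st.2.2 i v)

def solve (nums : List Int) (n : Int) : Int :=
  ((PySem.List.pyRange 0 n 1).foldl pvStepA (PySem.Dict.empty, 0, nums)).2.1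

-- ===== PORT B =====
-- first loop of B: nums[i] = nums[i] - i; vals.append(nums[i]); state = (nums, vals)
def pvStepB (st : List Int × List Int) (i : Int) : List Int × List Int :=
  let v := PySem.List.pyGetD st.1 i 0 - i
  (PySem.List.pySetD st.1 i v, st.2 ++ [v])

-- run-scan loop of B over the sorted values; state = (run, prev, ans)
def pvRunStep (st : Int × Option Int × Int) (x : Int) : Int × Option Int × Int :=
  if some x == st.2.1 then (st.1 + 1, some x, st.2.2)
  else (1, some x, st.2.2 + PySem.Int.floordiv (st.1 * (st.1 - 1)) 2)

def solve_alt (nums : List Int) (n : Int) : Int :=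
  let st := (PySem.List.pyRange 0 n 1).foldl pvStepB (nums, [])
  let b := PySem.List.sorted st.2 (fun x => x) false
  let r := b.foldl pvRunStep (0, (none : Option Int), 0)
  r.2.2 + PySem.Int.floordiv (r.1 * (r.1 - 1)) 2

-- ===== PRECONDITION & SPEC =====
-- Pre_ excludes exactly the inputs where Python A raises IndexError: n larger than len(nums).
def Pre_solve (nums : List Int) (n : Int) : Prop := n ≤ (nums.length : Int)
instance (nums : List Int) (n : Int) : Decidable (Pre_solve nums n) := by unfold Pre_solve; infer_instance
def pvWitness_solve : List Int × Int := ([3, 4, 5, 1, 2], 5)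

def Spec_solve (nums : List Int) (n : Int) (out : Int) : Prop := out = solve_alt nums n
instance (nums : List Int) (n : Int) (out : Int) : Decidable (Spec_solve nums n out) := by unfold Spec_solve; infer_instance

-- ===== CLAIM (what is proved, stated in full; the proofs are below) =====
def Claim_equal_solve : Prop := ∀ (nums : List Int) (n : Int), Dom_solve nums n → Pre_solve nums n → Spec_solve nums n (solve nums n)

-- ===== LEMMAS AND PROOFS =====

-- C(k,2) as B computes it
def pvC2 (k : Int) : Int := PySem.Int.floordiv (k * (k - 1)) 2

lemma pvC2_succ (k : Int) : pvC2 (k + 1) = pvC2 k + k := by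
  unfold pvC2
  rw [PySem.Int.floordiv_eq_ediv_of_pos (show (0:Int) < 2 by norm_num),
      PySem.Int.floordiv_eq_ediv_of_pos (show (0:Int) < 2 by norm_num)]
  have h : (k + 1) * (k + 1 - 1) = k * (k - 1) + k * 2 := by ring
  rw [h, Int.add_mul_ediv_right _ _ (show (2:Int) ≠ 0 by norm_num)]

lemma pvC2_zero : pvC2 0 = 0 := by decide

-- number of unordered equal pairs in a list
def pvPc : List Int → Int
  | [] => 0
  | x :: t => (t.count x : Int) + pvPc t

lemma pvPc_snoc (L : List Int) (x : Int) : pvPc (L ++ [x]) = pvPc L + L.count x := by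
  induction L with
  | nil => simp [pvPc]
  | cons y L ih =>
    by_cases h : x = y
    · subst h
      simp only [List.cons_append, pvPc, ih, List.count_append, List.count_cons_self,
        List.count_nil]
      push_cast
      ring
    · have h' : ¬ (y = x) := fun hh => h hh.symm
      simp only [List.cons_append, pvPc, ih, List.count_append, List.count_cons,
        List.count_nil, beq_iff_eq, if_neg h, if_neg h']
      push_cast
      ring

lemma pvPc_perm {L L' : List Int} (h : L.Perm L') : pvPc L = pvPc L' := by
  induction h with
  | nil => rfl
  | cons x h ih => simp [pvPc, ih, h.count_eq]
  | swap x y t =>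
    by_cases h : x = y
    · subst h; rfl
    · have h' : ¬ (y = x) := fun hh => h hh.symm
      simp only [pvPc, List.count_cons, beq_iff_eq, if_neg h, if_neg h']
      push_cast
      ring
  | trans _ _ ih1 ih2 => exact ih1.trans ih2

-- split the pairs of t into the pairs of value x and the rest
lemma pvPc_split (t : List Int) (x : Int) :
    pvPc t = pvC2 (t.count x) + pvPc (t.filter (fun y => y != x)) := by
  induction t with
  | nil => simp [pvPc, pvC2_zero]
  | cons y t ih =>
    by_cases h : y = x
    · subst h
      have hfc : (y :: t).filter (fun z => z != y) = t.filter (fun z => z != y) := by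
        simp
      simp only [pvPc, List.count_cons_self, hfc]
      rw [ih]
      push_cast
      rw [pvC2_succ]
      ring
    · have h2 : x ≠ y := fun hh => h hh.symm
      have hfc : (y :: t).filter (fun z => z != x) = y :: t.filter (fun z => z != x) := by
        simp [h]
      have hnc : ((y :: t).count x) = t.count x := by
        simp [List.count_cons]
        exact h
      simp only [pvPc, hfc, hnc]
      rw [ih]
      have hc : (t.filter (fun z => z != x)).count y = t.count y := by
        rw [List.count_filter]
        simp [h]
      rw [hc]
      ring

-- a sorted block starting at x: closing the run of the x's accounts for all pairs of x::t
lemma pvBlock (x : Int) (t : List Int) (hx : ∀ y ∈ t, x ≤ y) :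
    pvC2 (1 + t.count x) + pvPc (t.filter (fun y => decide (x < y))) = pvPc (x :: t) := by
  have hf : t.filter (fun y => decide (x < y)) = t.filter (fun y => y != x) := by
    apply List.filter_congr
    intro y hy
    have hxy := hx y hy
    by_cases hyx : y = x
    · subst hyx
      show decide (y < y) = (y != y)
      simp
    · show decide (x < y) = (y != x)
      have hb : (y != x) = true := by simp [hyx]
      rw [hb, decide_eq_true_eq]
      omega
  rw [hf]
  have : (1 : Int) + t.count x = (t.count x : Int) + 1 := by ring
  rw [this, pvC2_succ]
  simp only [pvPc]
  rw [pvPc_split t x]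
  ring

-- the run-scan fold, generalized over a state in the middle of a run of p's
lemma pvRunGo (s : List Int) (p run ans : Int)
    (hs : s.Pairwise (· ≤ ·)) (hp : ∀ x ∈ s, p ≤ x) :
    (s.foldl pvRunStep (run, some p, ans)).2.2
        + pvC2 (s.foldl pvRunStep (run, some p, ans)).1
      = ans + pvC2 (run + s.count p) + pvPc (s.filter (fun y => decide (p < y))) := by
  induction s generalizing p run ans with
  | nil => simp [pvPc]
  | cons x t ih =>
    rw [List.pairwise_cons] at hs
    simp only [List.foldl_cons]
    by_cases hxp : x = p
    · subst hxp
      have hstep : pvRunStep (run, some x, ans) x = (run + 1, some x, ans) := by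
        simp [pvRunStep]
      rw [hstep, ih x (run + 1) ans hs.2 (fun y hy => hs.1 y hy)]
      have h1 : run + 1 + (t.count x : Int) = run + ((x :: t).count x : Int) := by
        simp [List.count_cons_self]; ring
      rw [h1]
      have h2 : (x :: t).filter (fun y => decide (x < y)) = t.filter (fun y => decide (x < y)) := by
        simp
      rw [h2]
    · have hpx : p < x := lt_of_le_of_ne (hp x (List.mem_cons_self)) (fun h => hxp h.symm)
      have hstep : pvRunStep (run, some p, ans) x
          = (1, some x, ans + PySem.Int.floordiv (run * (run - 1)) 2) := by
        simp [pvRunStep, hxp]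
      rw [hstep, ih x 1 _ hs.2 (fun y hy => hs.1 y hy)]
      have hcnt : ((x :: t).count p : Int) = 0 := by
        have hxne : ¬ (x = p) := hxp
        have htz : t.count p = 0 := by
          rw [List.count_eq_zero]
          intro hmem
          have := hs.1 p hmem
          omega
        simp [hxne, htz]
      have hfl : (x :: t).filter (fun y => decide (p < y)) = x :: t := by
        rw [List.filter_eq_self]
        intro y hy
        rcases List.mem_cons.1 hy with rfl | hy'
        · simpa using hpx
        · have := hs.1 y hy'
          simp only [decide_eq_true_eq]; omega
      rw [hcnt, hfl]
      have := pvBlock x t hs.1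
      show ans + pvC2 run + pvC2 (1 + ↑(t.count x))
          + pvPc (t.filter (fun y => decide (x < y)))
        = ans + pvC2 (run + 0) + pvPc (x :: t)
      rw [add_zero]
      rw [add_assoc (ans + pvC2 run), this]

-- the whole run-scan over a sorted list counts all equal pairs
lemma pvRunscan (s : List Int) (hs : s.Pairwise (· ≤ ·)) :
    (s.foldl pvRunStep (0, (none : Option Int), 0)).2.2
        + PySem.Int.floordiv ((s.foldl pvRunStep (0, (none : Option Int), 0)).1
            * ((s.foldl pvRunStep (0, (none : Option Int), 0)).1 - 1)) 2
      = pvPc s := by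
  cases s with
  | nil => decide
  | cons x t =>
    rw [List.pairwise_cons] at hs
    simp only [List.foldl_cons]
    have hstep : pvRunStep (0, (none : Option Int), 0) x = (1, some x, 0) := by
      simp [pvRunStep]
    rw [hstep]
    have hgo := pvRunGo t x 1 0 hs.2 hs.1
    have hc : (1 : Int) + (t.count x : Int) = 1 + t.count x := rfl
    calc (t.foldl pvRunStep (1, some x, 0)).2.2
        + PySem.Int.floordiv ((t.foldl pvRunStep (1, some x, 0)).1
            * ((t.foldl pvRunStep (1, some x, 0)).1 - 1)) 2
        = (t.foldl pvRunStep (1, some x, 0)).2.2 + pvC2 (t.foldl pvRunStep (1, some x, 0)).1 := rfl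
      _ = 0 + pvC2 (1 + t.count x) + pvPc (t.filter (fun y => decide (x < y))) := hgo
      _ = pvC2 (1 + t.count x) + pvPc (t.filter (fun y => decide (x < y))) := by ring
      _ = pvPc (x :: t) := pvBlock x t hs.1

-- the mutated list after the first m iterations of the index loop
def pvMut (nums : List Int) : Nat → List Int
  | 0 => nums
  | m + 1 => (pvMut nums m).set m ((pvMut nums m).getD m 0 - (m : Int))

-- the transformed values nums[i] - i for i < m (in terms of the ORIGINAL nums)
def pvVals (nums : List Int) (m : Nat) : List Int :=
  (List.range m).map (fun i => nums.getD i 0 - (i : Int))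

lemma pvMut_getD_ge (nums : List Int) (m j : Nat) (h : m ≤ j) :
    (pvMut nums m).getD j 0 = nums.getD j 0 := by
  induction m with
  | zero => rfl
  | succ m ih =>
    have hmj : m ≠ j := by omega
    simp only [pvMut, List.getD, List.getElem?_set_ne hmj]
    exact ih (by omega)

-- both index loops at once: A's state is (counter of the values, pair count, mutated list),
-- B's state is (mutated list, the values)
lemma pvLoop (nums : List Int) (m : Nat) :
    (PySem.List.pyRange 0 (m : Int) 1).foldl pvStepA (PySem.Dict.empty, 0, nums)
      = (PySem.Dict.counter (pvVals nums m), pvPc (pvVals nums m), pvMut nums m)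
    ∧ (PySem.List.pyRange 0 (m : Int) 1).foldl pvStepB (nums, [])
      = (pvMut nums m, pvVals nums m) := by
  induction m with
  | zero =>
    constructor <;> rfl
  | succ m ih =>
    have hcast : ((m + 1 : Nat) : Int) = (m : Int) + 1 := by push_cast; ring
    rw [hcast, PySem.List.pyRange_one_succ_right (by positivity), List.foldl_append,
      List.foldl_append, ih.1, ih.2]
    have hv : PySem.List.pyGetD (pvMut nums m) (m : Int) 0 - (m : Int)
        = (pvMut nums m).getD m 0 - (m : Int) := by
      simp [PySem.List.pyGetD_natCast]
    have hv' : (pvMut nums m).getD m 0 - (m : Int) = nums.getD m 0 - (m : Int) := by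
      rw [pvMut_getD_ge nums m m le_rfl]
    have hvals : pvVals nums (m + 1) = pvVals nums m ++ [nums.getD m 0 - (m : Int)] := by
      simp [pvVals, List.range_succ]
    constructor
    · simp only [List.foldl_cons, List.foldl_nil, pvStepA, hv, hv']
      refine Prod.ext ?_ (Prod.ext ?_ ?_)
      · show (PySem.Dict.counter (pvVals nums m)).modify (nums.getD m 0 - (m : Int)) 0 (· + 1)
            = PySem.Dict.counter (pvVals nums (m + 1))
        rw [hvals, PySem.Dict.counter_append_singleton]
      · show pvPc (pvVals nums m)
            + (PySem.Dict.counter (pvVals nums m)).getD (nums.getD m 0 - (m : Int)) 0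
            = pvPc (pvVals nums (m + 1))
        rw [PySem.Dict.getD_counter, hvals, pvPc_snoc]
      · show PySem.List.pySetD (pvMut nums m) (m : Int) (nums.getD m 0 - (m : Int))
            = pvMut nums (m + 1)
        rw [PySem.List.pySetD_natCast]
        simp only [pvMut]
        rw [pvMut_getD_ge nums m m le_rfl]
    · simp only [List.foldl_cons, List.foldl_nil, pvStepB, hv, hv']
      refine Prod.ext ?_ ?_
      · show PySem.List.pySetD (pvMut nums m) (m : Int) (nums.getD m 0 - (m : Int))
            = pvMut nums (m + 1)
        rw [PySem.List.pySetD_natCast]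
        simp only [pvMut]
        rw [pvMut_getD_ge nums m m le_rfl]
      · show pvVals nums m ++ [nums.getD m 0 - (m : Int)] = pvVals nums (m + 1)
        rw [hvals]

lemma pvRange_nonpos (n : Int) (h : n ≤ 0) : PySem.List.pyRange 0 n 1 = [] := by
  rw [List.eq_nil_iff_forall_not_mem]
  intro x hx
  rw [PySem.List.mem_pyRange_one] at hx
  omega

-- ===== VERDICT (by name: the statement is the Claim_ definition above) =====
theorem solve_spec : Claim_equal_solve := by
  intro nums n _hd hpre
  unfold Spec_solve solve solve_alt
  by_cases hn : n ≤ 0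
  · rw [pvRange_nonpos n hn]
    show (0 : Int) = (0 : Int) + PySem.Int.floordiv (0 * (0 - 1)) 2
    decide
  · have h0 : 0 ≤ n := by omega
    obtain ⟨m, rfl⟩ : ∃ m : Nat, n = (m : Int) := ⟨n.toNat, (Int.toNat_of_nonneg h0).symm⟩
    obtain ⟨hA, hB⟩ := pvLoop nums m
    rw [hA, hB]
    have hpair := PySem.List.sorted_pairwise (pvVals nums m) (fun x => x)
    have hperm := PySem.List.sorted_perm (pvVals nums m) (fun x => x) false
    have hrun := pvRunscan (PySem.List.sorted (pvVals nums m) (fun x => x) false)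
      (by simpa using hpair)
    show pvPc (pvVals nums m) = _
    rw [hrun, pvPc_perm hperm]
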